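-- pv_equiv track=rewrite | github.com/zhuatou537gjhkkk/AriadneModified | src/backend/app/etl/normalizer.py | _extract_sysmon_hash
-- ===== SOURCE A (Python) =====
-- from typing import Dict, Any, Optional, Set
--
-- def _extract_sysmon_hash(hashes: str) -> Optional[str]:
--     """
--     从 Sysmon 的 hashes 字段提取哈希值（优先SHA256）
--
--     格式: "SHA1=xxx,MD5=xxx,SHA256=xxx,IMPHASH=xxx"
--     """
--     if not hashes:
--         return None
--
--     hash_dict = {}
--     for item in hashes.split(","):
--         if "=" in item:
--             key, value = item.split("=", 1)
--             hash_dict[key.strip().upper()] = value.strip()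
--
--     # 优先返回 SHA256
--     return hash_dict.get("SHA256") or hash_dict.get("SHA1") or hash_dict.get("MD5")
-- ===== SOURCE B (Python) =====
-- def _extract_sysmon_hash(hashes: str):
--     if not hashes:
--         return None
--     items = hashes.split(",")
--     val = None
--     for key in ("SHA256", "SHA1", "MD5"):
--         val = None
--         for item in items:
--             if "=" in item:
--                 k, v = item.split("=", 1)
--                 if k.strip().upper() == key:
--                     val = v.strip()
--         if val:
--             return val
--     return val
-- ===== Notes on version B (the rewrite author's own statement) =====
-- stated objective: simpler
-- what changed: B removes the intermediate dict and the or-chain: for each priority key (SHA256, SHA1, MD5) it scans the split items keeping the last matching value and returns the first truthy one.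
import Mathlib
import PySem

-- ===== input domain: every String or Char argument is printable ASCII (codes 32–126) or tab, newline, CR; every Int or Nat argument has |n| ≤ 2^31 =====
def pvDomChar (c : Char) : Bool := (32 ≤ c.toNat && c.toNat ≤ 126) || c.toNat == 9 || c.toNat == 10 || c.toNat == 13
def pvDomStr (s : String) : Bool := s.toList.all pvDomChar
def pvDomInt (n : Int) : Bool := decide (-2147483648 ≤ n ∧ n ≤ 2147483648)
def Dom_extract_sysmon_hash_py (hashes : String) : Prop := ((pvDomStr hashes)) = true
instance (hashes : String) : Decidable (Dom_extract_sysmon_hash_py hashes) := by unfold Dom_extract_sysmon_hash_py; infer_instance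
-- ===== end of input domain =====

-- B drops the intermediate dict: for each priority key in turn it scans the split items
-- for the last matching "KEY=VALUE" entry (simpler decomposition, no dict; same values).

-- hashes.split(","): sep is non-empty, so PySem.Str.split? is always `some`
def pySplitComma (s : String) : List String := (PySem.Str.split? s ",").getD []

-- ===== PORT A =====
-- Python's truthiness-based `a or b` on Optional[str]: some "" and none are falsy.
def pyOrStr (a b : Option String) : Option String :=
  match a with
  | some s => if s = "" then b else some s
  | none => b

-- body of A's dict-building loop
def stepA (d : PySem.Dict String String) (item : String) : PySem.Dict String String :=
  if PySem.Str.isIn "=" item then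
    match PySem.Str.splitMax? item "=" 1 with
    | some [key, value] =>
        d.insert (PySem.Str.upper (PySem.Str.strip key)) (PySem.Str.strip value)
    | _ => d  -- unreachable: split("=",1) with "=" in item yields exactly two pieces
  else d

def extract_sysmon_hash_py (hashes : String) : Option String :=
  if hashes = "" then none
  else
    let hash_dict := (pySplitComma hashes).foldl stepA PySem.Dict.empty
    pyOrStr (hash_dict.get? "SHA256")
      (pyOrStr (hash_dict.get? "SHA1") (hash_dict.get? "MD5"))

-- ===== PORT B =====
-- truthiness of `val` (Optional[str]) in `if val:`
def pyTruthyStr (a : Option String) : Bool :=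
  match a with
  | some s => s ≠ ""
  | none => false

-- body of B's inner scan: keep the value of the last item matching `key`
def stepB (key : String) (val : Option String) (item : String) : Option String :=
  if PySem.Str.isIn "=" item then
    match PySem.Str.splitMax? item "=" 1 with
    | some [k, v] =>
        if PySem.Str.upper (PySem.Str.strip k) = key then some (PySem.Str.strip v)
        else val
    | _ => val
  else val

def lastMatch (items : List String) (key : String) : Option String :=
  items.foldl (stepB key) none

def extract_sysmon_hash_py_alt (hashes : String) : Option String :=
  if hashes = "" then none
  else
    let items := pySplitComma hashes
    -- the for-loop over ("SHA256","SHA1","MD5") with its early returns, unrolled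
    let v1 := lastMatch items "SHA256"
    if pyTruthyStr v1 then v1
    else
      let v2 := lastMatch items "SHA1"
      if pyTruthyStr v2 then v2
      else lastMatch items "MD5"

-- ===== PRECONDITION & SPEC =====
def Spec_extract_sysmon_hash_py (hashes : String) (out : Option String) : Prop := out = extract_sysmon_hash_py_alt hashes
instance (hashes : String) (out : Option String) : Decidable (Spec_extract_sysmon_hash_py hashes out) := by unfold Spec_extract_sysmon_hash_py; infer_instance

-- ===== CLAIM (what is proved, stated in full; the proofs are below) =====
def Claim_equal_extract_sysmon_hash_py : Prop := ∀ (hashes : String), Dom_extract_sysmon_hash_py hashes → Spec_extract_sysmon_hash_py hashes (extract_sysmon_hash_py hashes)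

-- ===== LEMMAS AND PROOFS =====

-- one item: A's dict update, looked up at `key`, is B's scan step
theorem get?_stepA (d : PySem.Dict String String) (item key : String) :
    (stepA d item).get? key = stepB key (d.get? key) item := by
  unfold stepA stepB
  by_cases h : PySem.Str.isIn "=" item = true
  · simp only [h, if_pos]
    cases hp : PySem.Str.splitMax? item "=" 1 with
    | none => rfl
    | some l =>
      match l with
      | [] => rfl
      | [k] => rfl
      | [k, v] =>
        show (d.insert (PySem.Str.upper (PySem.Str.strip k)) (PySem.Str.strip v)).get? key
            = if PySem.Str.upper (PySem.Str.strip k) = key then some (PySem.Str.strip v)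
              else d.get? key
        by_cases hk : PySem.Str.upper (PySem.Str.strip k) = key
        · rw [if_pos hk, hk, PySem.Dict.get?_insert_self]
        · exact (if_neg hk) ▸ PySem.Dict.get?_insert_of_ne d (PySem.Str.strip v) (fun he => hk he.symm)
      | k :: v :: w :: t => rfl
  · simp only [h]
    simp

-- the dict built by A's loop agrees, at any key, with B's last-match scan
theorem get?_foldl_eq_lastMatch (items : List String) (key : String)
    (d : PySem.Dict String String) :
    (items.foldl stepA d).get? key = items.foldl (stepB key) (d.get? key) := by
  induction items generalizing d with
  | nil => rfl
  | cons item rest ih =>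
    simp only [List.foldl_cons]
    rw [ih, get?_stepA]

theorem pyOrStr_eq_ite (a b : Option String) :
    pyOrStr a b = if pyTruthyStr a then a else b := by
  cases a with
  | none => rfl
  | some s =>
    by_cases h : s = ""
    · simp [pyOrStr, pyTruthyStr, h]
    · simp [pyOrStr, pyTruthyStr, h]

-- ===== VERDICT (by name: the statement is the Claim_ definition above) =====
theorem extract_sysmon_hash_py_spec : Claim_equal_extract_sysmon_hash_py := by
  intro hashes _
  unfold Spec_extract_sysmon_hash_py extract_sysmon_hash_py extract_sysmon_hash_py_alt
  by_cases h : hashes = ""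
  · simp [h]
  · simp only [h, if_false]
    have hget : ∀ k, ((pySplitComma hashes).foldl stepA PySem.Dict.empty).get? k
        = lastMatch (pySplitComma hashes) k := by
      intro k
      rw [get?_foldl_eq_lastMatch]
      rfl
    rw [pyOrStr_eq_ite, pyOrStr_eq_ite, hget, hget, hget]
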